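-- pv_equiv track=rewrite | github.com/vahidzee/ocdaf | ocd/models/permutation/utils.py | abbriviate_permutation
-- ===== SOURCE A (Python) =====
-- import typing as th
--
-- def abbriviate_permutation(permutation_list: th.Iterable[int]) -> str:
--     """
--     Loop over the permutation_list (a list of unique integers) and find all consecutive sequences
--     of ascending/descending numbers and replace them with the first and last number in
--     the sequence. Numbers are expected to be between 0 and len(permutation_list) - 1.
--
--     For example: [0, 1, 2, 3, 4] -> ["0-4"] and [4, 3, 2, 1, 0] -> ["4-0"]
--         or [0, 1, 2, 3, 10, 9, 8, 4, 5, 7, 6] -> ["0-3", "10-8", "4-5", "7-6"]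
--
--     This is useful for plotting the permutation_list of the permutation matrix in a more compact way.
--
--     Args:
--         permutation_list (th.Iterable[int]): A list of unique integers between 0 and len(permutation_list) - 1
--
--     Returns:
--        an abbreviated string representation of the permutation_list
--     """
--     if len(permutation_list) < 2:
--         return permutation_list
--     permutation_list, results = list(permutation_list), []
--     ascending: bool = permutation_list[0] < permutation_list[1]
--     start, start_idx = permutation_list[0], 0
--     for i in range(1, len(permutation_list)):
--         if ascending and permutation_list[i] == permutation_list[i - 1] + 1:
--             continue
--         elif not ascending and permutation_list[i] == permutation_list[i - 1] - 1:
--             continue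
--         else:
--             if start_idx == i - 1:
--                 results.append(f"{start}")
--             else:
--                 results.append(f"{start}-{permutation_list[i-1]}")
--             start, start_idx = permutation_list[i], i
--             ascending = permutation_list[i] < permutation_list[i + 1] if i < len(permutation_list) - 1 else ascending
--
--     if start_idx < len(permutation_list) - 1:
--         results.append(f"{start}-{permutation_list[-1]}")
--     else:
--         results.append(f"{start}")
--     return f'[{",".join(results)}]'
-- ===== SOURCE B (Python) =====
-- def abbriviate_permutation(permutation_list):
--     # Greedy run-peeling: repeatedly peel the leading +/-1-step run off the
--     # remaining suffix and format it, instead of A's ascending-flag bookkeeping.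
--     if len(permutation_list) < 2:
--         return permutation_list
--     pl = list(permutation_list)
--     n = len(pl)
--     parts = []
--     k = 0
--     while k < n:
--         if k + 1 < n and abs(pl[k + 1] - pl[k]) == 1:
--             step = pl[k + 1] - pl[k]
--             j = k + 1
--             while j + 1 < n and pl[j + 1] - pl[j] == step:
--                 j += 1
--             parts.append(f"{pl[k]}-{pl[j]}")
--             k = j + 1
--         else:
--             parts.append(f"{pl[k]}")
--             k += 1
--     return "[" + ",".join(parts) + "]"
-- ===== Notes on version B (the rewrite author's own statement) =====
-- stated objective: simpler
-- what changed: Replaces A's single index loop with ascending-flag/lookahead bookkeeping and start-index state by a recursive greedy decomposition: peel the leading +/-1-step run off the front, format it, and recurse on the remainder.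
-- outside the precondition, e.g. on abbriviate_permutation([5]): A returns [5], B returns [5]; on abbriviate_permutation([]): A returns [], B returns []
import Mathlib
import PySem

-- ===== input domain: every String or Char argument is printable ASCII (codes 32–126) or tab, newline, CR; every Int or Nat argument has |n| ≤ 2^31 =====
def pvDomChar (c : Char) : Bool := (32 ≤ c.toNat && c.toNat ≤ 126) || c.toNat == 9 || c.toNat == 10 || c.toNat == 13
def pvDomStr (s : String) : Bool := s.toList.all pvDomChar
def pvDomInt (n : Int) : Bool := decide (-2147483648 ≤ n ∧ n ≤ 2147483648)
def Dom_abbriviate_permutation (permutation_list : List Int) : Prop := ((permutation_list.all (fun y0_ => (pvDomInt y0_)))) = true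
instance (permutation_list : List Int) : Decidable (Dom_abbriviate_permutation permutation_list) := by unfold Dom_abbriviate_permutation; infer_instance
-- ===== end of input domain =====

-- B replaces A's inline ascending-flag/lookahead index loop by a recursive greedy
-- run-splitting decomposition (objective: simpler). On len < 2 the Python A returns
-- the input list itself (not a str); those inputs are excluded by Pre_.

-- ===== PORT A =====
-- loop body of A's `for i in range(1, len(permutation_list))`
def pvAstep (xs : List Int) (n : Int) (st : List String × Bool × Int × Int) (i : Int) :
    List String × Bool × Int × Int :=
  match st with
  | (res, asc, start, sidx) =>
    if asc = true ∧ PySem.List.pyGetD xs i 0 = PySem.List.pyGetD xs (i - 1) 0 + 1 then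
      (res, asc, start, sidx)
    else if asc = false ∧ PySem.List.pyGetD xs i 0 = PySem.List.pyGetD xs (i - 1) 0 - 1 then
      (res, asc, start, sidx)
    else
      ((res ++ [if sidx = i - 1 then PySem.Int.toStr start
                else PySem.Int.toStr start ++ "-" ++ PySem.Int.toStr (PySem.List.pyGetD xs (i - 1) 0)]),
       (if i < n - 1 then decide (PySem.List.pyGetD xs i 0 < PySem.List.pyGetD xs (i + 1) 0) else asc),
       PySem.List.pyGetD xs i 0, i)

-- the two lines after A's loop (final append of the open group)
def pvAfin (xs : List Int) (n : Int) (st : List String × Bool × Int × Int) : List String :=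
  match st with
  | (res, _, start, sidx) =>
    res ++ [if sidx < n - 1 then
              PySem.Int.toStr start ++ "-" ++ PySem.Int.toStr (PySem.List.pyGetD xs (-1) 0)
            else PySem.Int.toStr start]

def abbriviate_permutation (permutation_list : List Int) : String :=
  -- Python returns the input list itself here (not a str); excluded by Pre_
  if permutation_list.length < 2 then "" else
  "[" ++ PySem.Str.join ","
    (pvAfin permutation_list (permutation_list.length : Int)
      ((PySem.List.pyRange 1 (permutation_list.length : Int)).foldl
        (pvAstep permutation_list (permutation_list.length : Int))
        ([], decide (PySem.List.pyGetD permutation_list 0 0 < PySem.List.pyGetD permutation_list 1 0),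
         PySem.List.pyGetD permutation_list 0 0, 0))) ++ "]"

-- ===== PORT B =====
-- B's inner `while` loop: extend the run as long as the diff equals `s`; returns (last, rest)
def pvTakeRunB (s : Int) (last : Int) : List Int → Int × List Int
  | [] => (last, [])
  | y :: t => if y - last = s then pvTakeRunB s y t else (last, y :: t)

theorem pvTakeRunB_snd_length (s last : Int) (t : List Int) :
    (pvTakeRunB s last t).2.length ≤ t.length := by
  induction t generalizing last with
  | nil => simp [pvTakeRunB]
  | cons y t ih =>
    simp only [pvTakeRunB]
    split
    · exact Nat.le_succ_of_le (ih y)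
    · simp

-- B's recursive `runs`
def pvRunsB : List Int → List String
  | [] => []
  | [a] => [PySem.Int.toStr a]
  | a :: b :: t =>
    if b - a = 1 ∨ b - a = -1 then
      (PySem.Int.toStr a ++ "-" ++ PySem.Int.toStr (pvTakeRunB (b - a) b t).1)
        :: pvRunsB (pvTakeRunB (b - a) b t).2
    else
      PySem.Int.toStr a :: pvRunsB (b :: t)
termination_by xs => xs.length
decreasing_by
  · have := pvTakeRunB_snd_length (b - a) b t; simp; omega
  · simp

def abbriviate_permutation_alt (permutation_list : List Int) : String :=
  -- Python returns the input list itself here (not a str); excluded by Pre_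
  if permutation_list.length < 2 then "" else
  "[" ++ PySem.Str.join "," (pvRunsB permutation_list) ++ "]"

-- ===== PRECONDITION & SPEC =====
-- Pre_ excludes lists of length < 2, on which Python A returns the input list itself
-- (an Iterable, not the declared str).
def Pre_abbriviate_permutation (permutation_list : List Int) : Prop :=
  2 ≤ permutation_list.length
instance (permutation_list : List Int) : Decidable (Pre_abbriviate_permutation permutation_list) := by
  unfold Pre_abbriviate_permutation; infer_instance

def pvWitness_abbriviate_permutation : List Int := [0, 1, 2, 4, 3]

def Spec_abbriviate_permutation (permutation_list : List Int) (out : String) : Prop := out = abbriviate_permutation_alt permutation_list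
instance (permutation_list : List Int) (out : String) : Decidable (Spec_abbriviate_permutation permutation_list out) := by unfold Spec_abbriviate_permutation; infer_instance

-- ===== CLAIM (what is proved, stated in full; the proofs are below) =====
def Claim_equal_abbriviate_permutation : Prop := ∀ (permutation_list : List Int), Dom_abbriviate_permutation permutation_list → Pre_abbriviate_permutation permutation_list → Spec_abbriviate_permutation permutation_list (abbriviate_permutation permutation_list)

-- ===== LEMMAS AND PROOFS =====

-- shorthand for Python's permutation_list[k] on Nat indices (proof-side only)
def pvX (xs : List Int) (k : Nat) : Int := xs.getD k 0

theorem pv_neg_one (xs : List Int) (h : xs ≠ []) :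
    PySem.List.pyGetD xs (-1) 0 = pvX xs (xs.length - 1) := by
  have h1 : 1 ≤ xs.length := List.length_pos_iff.mpr h
  simp [PySem.List.pyGetD, PySem.List.pyGet?, PySem.List.pyIdx?, h1, pvX, List.getD]

theorem pvX_natCast (xs : List Int) (k : Nat) :
    PySem.List.pyGetD xs (k : Int) 0 = pvX xs k := PySem.List.pyGetD_natCast xs k 0

theorem pv_drop (xs : List Int) (k : Nat) (h : k < xs.length) :
    xs.drop k = pvX xs k :: xs.drop (k + 1) := by
  rw [List.drop_eq_getElem_cons h]
  congr 1
  simp [pvX, List.getD_eq_getElem?_getD, List.getElem?_eq_getElem h]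

theorem pv_main (xs : List Int) :
    ∀ m i res asc, 1 ≤ i → i ≤ xs.length → xs.length - i = m →
    ((i < xs.length → asc = decide (pvX xs (i - 1) < pvX xs i)) →
      pvAfin xs (xs.length : Int)
        ((PySem.List.pyRange (i : Int) (xs.length : Int)).foldl (pvAstep xs (xs.length : Int))
          (res, asc, pvX xs (i - 1), ((i - 1 : Nat) : Int)))
        = res ++ pvRunsB (xs.drop (i - 1)))
    ∧ (∀ s sidx, (s = 1 ∨ s = -1) → sidx + 2 ≤ i → asc = decide (s = 1) →
      pvAfin xs (xs.length : Int)
        ((PySem.List.pyRange (i : Int) (xs.length : Int)).foldl (pvAstep xs (xs.length : Int))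
          (res, asc, pvX xs sidx, (sidx : Int)))
        = res ++ (PySem.Int.toStr (pvX xs sidx) ++ "-"
                    ++ PySem.Int.toStr (pvTakeRunB s (pvX xs (i - 1)) (xs.drop i)).1)
                 :: pvRunsB (pvTakeRunB s (pvX xs (i - 1)) (xs.drop i)).2) := by
  intro m
  induction m using Nat.strong_induction_on with
  | _ m ih =>
  intro i res asc h1 hile hm
  by_cases hin : i < xs.length
  · -- i < length : one loop step, then the induction hypothesis
    have hR : PySem.List.pyRange (i : Int) (xs.length : Int)
        = (i : Int) :: PySem.List.pyRange ((i : Int) + 1) (xs.length : Int) :=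
      PySem.List.pyRange_one_cons (by exact_mod_cast hin)
    have hc1 : ((i : Int) + 1) = ((i + 1 : Nat) : Int) := by push_cast; ring
    have hgi : PySem.List.pyGetD xs (i : Int) 0 = pvX xs i := pvX_natCast xs i
    have hgi1 : PySem.List.pyGetD xs ((i : Int) - 1) 0 = pvX xs (i - 1) := by
      rw [show ((i : Int) - 1) = ((i - 1 : Nat) : Int) by omega]; exact pvX_natCast xs (i - 1)
    have hgi2 : PySem.List.pyGetD xs ((i : Int) + 1) 0 = pvX xs (i + 1) := by
      rw [hc1]; exact pvX_natCast xs (i + 1)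
    have hdropi : xs.drop (i - 1) = pvX xs (i - 1) :: xs.drop i := by
      have := pv_drop xs (i - 1) (by omega)
      rwa [show i - 1 + 1 = i by omega] at this
    have hdropi2 : xs.drop i = pvX xs i :: xs.drop (i + 1) := pv_drop xs i hin
    constructor
    · -- MAIN: a fresh group started at i-1
      intro hasc
      have hasc := hasc hin
      rw [hR, List.foldl_cons, hasc]
      by_cases hd1 : pvX xs i = pvX xs (i - 1) + 1
      · -- continue ascending; enter the run lemma with s = 1
        have hlt : pvX xs (i - 1) < pvX xs i := by omega
        have hstep : pvAstep xs (xs.length : Int)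
            (res, decide (pvX xs (i - 1) < pvX xs i), pvX xs (i - 1), ((i - 1 : Nat) : Int)) (i : Int)
            = (res, decide (pvX xs (i - 1) < pvX xs i), pvX xs (i - 1), ((i - 1 : Nat) : Int)) := by
          simp [pvAstep, hgi, hgi1, hd1]
        rw [hstep, hc1]
        have hrun := (ih (xs.length - (i + 1)) (by omega) (i + 1) res
            (decide (pvX xs (i - 1) < pvX xs i)) (by omega) (by omega) rfl).2 1 (i - 1)
            (Or.inl rfl) (by omega) (by simp [hlt])
        rw [show (((i : Nat) + 1 : Nat) - 1 : Nat) = i by omega] at hrun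
        rw [hrun, hdropi, hdropi2]
        have hcond : pvX xs i - pvX xs (i - 1) = 1 ∨ pvX xs i - pvX xs (i - 1) = -1 := by omega
        simp only [pvRunsB, if_pos hcond]
        rw [show pvX xs i - pvX xs (i - 1) = 1 by omega]
      · by_cases hd2 : pvX xs i = pvX xs (i - 1) - 1
        · -- continue descending; run lemma with s = -1
          have hlt : ¬ pvX xs (i - 1) < pvX xs i := by omega
          have hstep : pvAstep xs (xs.length : Int)
              (res, decide (pvX xs (i - 1) < pvX xs i), pvX xs (i - 1), ((i - 1 : Nat) : Int)) (i : Int)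
              = (res, decide (pvX xs (i - 1) < pvX xs i), pvX xs (i - 1), ((i - 1 : Nat) : Int)) := by
            simp [pvAstep, hgi, hgi1, hd2]
          rw [hstep, hc1]
          have hrun := (ih (xs.length - (i + 1)) (by omega) (i + 1) res
              (decide (pvX xs (i - 1) < pvX xs i)) (by omega) (by omega) rfl).2 (-1) (i - 1)
              (Or.inr rfl) (by omega) (by simp [hlt])
          rw [show (((i : Nat) + 1 : Nat) - 1 : Nat) = i by omega] at hrun
          rw [hrun, hdropi, hdropi2]
          have hcond : pvX xs i - pvX xs (i - 1) = 1 ∨ pvX xs i - pvX xs (i - 1) = -1 := by omega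
          simp only [pvRunsB, if_pos hcond]
          rw [show pvX xs i - pvX xs (i - 1) = (-1 : Int) by omega]
        · -- break: close the singleton group, restart at i
          have hstep : pvAstep xs (xs.length : Int)
              (res, decide (pvX xs (i - 1) < pvX xs i), pvX xs (i - 1), ((i - 1 : Nat) : Int)) (i : Int)
              = (res ++ [PySem.Int.toStr (pvX xs (i - 1))],
                 (if (i : Int) < (xs.length : Int) - 1 then decide (pvX xs i < pvX xs (i + 1))
                  else decide (pvX xs (i - 1) < pvX xs i)), pvX xs i, (i : Int)) := by
            simp [pvAstep, hgi, hgi1, hgi2, hd1, hd2]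
            omega
          rw [hstep, hc1]
          have hmain := (ih (xs.length - (i + 1)) (by omega) (i + 1)
              (res ++ [PySem.Int.toStr (pvX xs (i - 1))])
              (if (i : Int) < (xs.length : Int) - 1 then decide (pvX xs i < pvX xs (i + 1))
               else decide (pvX xs (i - 1) < pvX xs i)) (by omega) (by omega) rfl).1
            (by intro hlt2
                rw [if_pos (by omega : (i : Int) < (xs.length : Int) - 1)]
                rw [show (((i : Nat) + 1 : Nat) - 1 : Nat) = i by omega])
          rw [show (((i : Nat) + 1 : Nat) - 1 : Nat) = i by omega] at hmain
          rw [hmain, hdropi, hdropi2]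
          have hcond : ¬ (pvX xs i - pvX xs (i - 1) = 1 ∨ pvX xs i - pvX xs (i - 1) = -1) := by omega
          simp only [pvRunsB, if_neg hcond]
          rw [← hdropi2]
          simp
    · -- RUN: inside an established run with step s, group started at sidx
      intro s sidx hs hsidx hasc
      rw [hR, List.foldl_cons, hasc]
      by_cases hds : pvX xs i - pvX xs (i - 1) = s
      · -- run continues
        have hstep : pvAstep xs (xs.length : Int)
            (res, decide (s = 1), pvX xs sidx, (sidx : Int)) (i : Int)
            = (res, decide (s = 1), pvX xs sidx, (sidx : Int)) := by
          rcases hs with h | h <;> subst h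
          · have hd : pvX xs i = pvX xs (i - 1) + 1 := by omega
            simp [pvAstep, hgi, hgi1, hd]
          · have hd : pvX xs i = pvX xs (i - 1) - 1 := by omega
            simp [pvAstep, hgi, hgi1, hd]
        rw [hstep, hc1]
        have hrun := (ih (xs.length - (i + 1)) (by omega) (i + 1) res
            (decide (s = 1)) (by omega) (by omega) rfl).2 s sidx hs (by omega) rfl
        rw [show (((i : Nat) + 1 : Nat) - 1 : Nat) = i by omega] at hrun
        rw [hrun, hdropi2]
        rw [show pvTakeRunB s (pvX xs (i - 1)) (pvX xs i :: xs.drop (i + 1))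
              = pvTakeRunB s (pvX xs i) (xs.drop (i + 1)) from by
          simp [pvTakeRunB, hds]]
      · -- run breaks: close the long group, restart at i
        have hstep : pvAstep xs (xs.length : Int)
            (res, decide (s = 1), pvX xs sidx, (sidx : Int)) (i : Int)
            = (res ++ [PySem.Int.toStr (pvX xs sidx) ++ "-" ++ PySem.Int.toStr (pvX xs (i - 1))],
               (if (i : Int) < (xs.length : Int) - 1 then decide (pvX xs i < pvX xs (i + 1))
                else decide (s = 1)), pvX xs i, (i : Int)) := by
          have hsne : ¬ ((sidx : Int) = (i : Int) - 1) := by omega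
          rcases hs with h | h <;> subst h
          · have hd : ¬ pvX xs i = pvX xs (i - 1) + 1 := by omega
            simp [pvAstep, hgi, hgi1, hgi2, hd, hsne]
          · have hd : ¬ pvX xs i = pvX xs (i - 1) - 1 := by omega
            simp [pvAstep, hgi, hgi1, hgi2, hd, hsne]
        rw [hstep, hc1]
        have hmain := (ih (xs.length - (i + 1)) (by omega) (i + 1)
            (res ++ [PySem.Int.toStr (pvX xs sidx) ++ "-" ++ PySem.Int.toStr (pvX xs (i - 1))])
            (if (i : Int) < (xs.length : Int) - 1 then decide (pvX xs i < pvX xs (i + 1))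
             else decide (s = 1)) (by omega) (by omega) rfl).1
          (by intro hlt2
              rw [if_pos (by omega : (i : Int) < (xs.length : Int) - 1)]
              rw [show (((i : Nat) + 1 : Nat) - 1 : Nat) = i by omega])
        rw [show (((i : Nat) + 1 : Nat) - 1 : Nat) = i by omega] at hmain
        rw [hmain]
        rw [show pvTakeRunB s (pvX xs (i - 1)) (xs.drop i)
              = (pvX xs (i - 1), xs.drop i) from by
          rw [hdropi2]; simp [pvTakeRunB, hds]]
        simp
  · -- i = length : empty loop, just the final append
    have hieq : i = xs.length := by omega
    have hR : PySem.List.pyRange (i : Int) (xs.length : Int) = [] := by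
      rw [hieq]; simp [pysem]
    have hne : xs ≠ [] := by intro h; rw [h] at hile; simp at hile; omega
    have hdrop : xs.drop (i - 1) = [pvX xs (i - 1)] := by
      have := pv_drop xs (i - 1) (by omega)
      rw [show i - 1 + 1 = i by omega, hieq, List.drop_length] at this
      rw [hieq]; exact this
    constructor
    · intro _
      rw [hR]
      simp only [List.foldl_nil, pvAfin]
      rw [if_neg (by omega : ¬ ((i - 1 : Nat) : Int) < (xs.length : Int) - 1)]
      rw [hdrop]
      simp [pvRunsB]
    · intro s sidx hs hsidx hasc
      rw [hR]
      simp only [List.foldl_nil, pvAfin]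
      rw [if_pos (by omega : ((sidx : Nat) : Int) < (xs.length : Int) - 1)]
      rw [hieq, List.drop_length]
      rw [pv_neg_one xs hne]
      rw [show xs.length - 1 = i - 1 by omega]
      simp [pvTakeRunB, pvRunsB]

-- ===== VERDICT (by name: the statement is the Claim_ definition above) =====
theorem abbriviate_permutation_spec : Claim_equal_abbriviate_permutation := by
  intro xs _ hpre
  have h2 : 2 ≤ xs.length := hpre
  unfold Spec_abbriviate_permutation abbriviate_permutation abbriviate_permutation_alt
  rw [if_neg (by omega), if_neg (by omega)]
  have h0 : PySem.List.pyGetD xs (0 : Int) 0 = pvX xs 0 := by exact_mod_cast pvX_natCast xs 0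
  have h1 : PySem.List.pyGetD xs (1 : Int) 0 = pvX xs 1 := by exact_mod_cast pvX_natCast xs 1
  have hmain := (pv_main xs (xs.length - 1) 1 [] (decide (pvX xs 0 < pvX xs 1))
      (by omega) (by omega) rfl).1 (by intro _; norm_num)
  simp only [Nat.cast_one, Nat.sub_self, Nat.cast_zero, List.drop_zero, List.nil_append] at hmain
  rw [h0, h1, hmain]
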